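-- pv_equiv track=rewrite | github.com/millidavids/dailyprogrammer | c142easy.py | settle_sand
-- ===== SOURCE A (Python) =====
-- def settle_sand(sandbox_list, grid):
--     sandbox_string = ''
--     for i in range(grid - 1):
--         for string_index in range(len(sandbox_list) - 1, 0, -1):
--             for char_index in range(len(sandbox_list[string_index])):
--                 if sandbox_list[string_index][char_index] == ' ' and sandbox_list[string_index - 1][char_index] == '.':
--                     bottom_string_list = list(sandbox_list[string_index])
--                     top_string_list = list(sandbox_list[string_index - 1])
--                     bottom_string_list[char_index] = '.'
--                     top_string_list[char_index] = ' '
--                     sandbox_list[string_index] = ''.join(bottom_string_list)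
--                     sandbox_list[string_index - 1] = ''.join(top_string_list)
--     for assemble in range(grid):
--         sandbox_string += sandbox_list[assemble] + '\n'
--     return sandbox_string
-- ===== SOURCE B (Python) =====
-- # B: per-column single pass. Transpose, then within each wall-delimited segment
-- # pack spaces on top and sand at the bottom by counting, then re-join rows.
-- # Note: A mutates sandbox_list in place; B does not (equivalence is about the return value).
--
-- def _settle_column(col):
--     out = []
--     seg = 0
--     sand = 0
--     for ch in col:
--         if ch == ' ' or ch == '.':
--             seg += 1
--             sand += 1 if ch == '.' else 0
--         else:
--             out += [' '] * (seg - sand) + ['.'] * sand + [ch]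
--             seg = 0
--             sand = 0
--     return out + [' '] * (seg - sand) + ['.'] * sand
--
--
-- def settle_sand(sandbox_list, grid):
--     rows = [sandbox_list[r] for r in range(grid)]
--     width = len(rows[0]) if rows else 0
--     cols = [_settle_column([row[c] for row in rows]) for c in range(width)]
--     return ''.join(''.join(col[r] for col in cols) + '\n' for r in range(len(rows)))
-- ===== Notes on version B (the rewrite author's own statement) =====
-- stated objective: faster
-- what changed: Replaces grid-1 full bubble passes over the whole grid (swapping one sand/space pair at a time, rebuilding the row strings on every swap) by a single counting pass per column: transpose, pack each wall-delimited segment with spaces on top and sand at the bottom, re-join rows.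
-- outside the precondition, e.g. on settle_sand(['.', ' ', '.', ' '], 3): A returns ' \n \n.\n', B returns ' \n.\n.\n'; on settle_sand(['..', ' '], 2): A returns ' .\n.\n', B raises IndexError
import Mathlib
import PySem

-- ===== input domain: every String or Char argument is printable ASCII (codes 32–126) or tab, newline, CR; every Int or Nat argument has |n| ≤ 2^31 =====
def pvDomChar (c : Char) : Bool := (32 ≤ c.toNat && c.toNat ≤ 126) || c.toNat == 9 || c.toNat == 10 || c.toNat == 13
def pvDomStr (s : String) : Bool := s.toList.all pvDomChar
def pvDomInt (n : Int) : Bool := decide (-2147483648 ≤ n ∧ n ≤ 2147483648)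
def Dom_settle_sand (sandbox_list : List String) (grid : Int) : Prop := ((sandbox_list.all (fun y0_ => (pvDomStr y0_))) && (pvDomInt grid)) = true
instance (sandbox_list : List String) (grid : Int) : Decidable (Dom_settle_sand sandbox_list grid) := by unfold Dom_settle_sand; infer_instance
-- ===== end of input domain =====

-- B replaces A's grid-1 whole-grid bubble passes by one counting pass per wall-delimited
-- column segment (spaces packed on top, sand at the bottom).  A mutates sandbox_list in
-- place; B does not — the equivalence proved here is about the return value only.

-- ===== PORT A =====
-- one conditional swap at rows (i-1, i), column c (the body of A's innermost loop)
def pvStep (sb : List String) (i c : Nat) : List String :=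
  if ((sb.getD i "").toList.getD c '?' == ' ') && ((sb.getD (i-1) "").toList.getD c '?' == '.') then
    let bottom_string_list := (sb.getD i "").toList.set c '.'
    let top_string_list := (sb.getD (i-1) "").toList.set c ' '
    (sb.set i (String.ofList bottom_string_list)).set (i-1) (String.ofList top_string_list)
  else sb

-- A's char_index loop for the row pair (i-1, i)
def pvPassPair (sb : List String) (i : Nat) : List String :=
  (List.range (sb.getD i "").toList.length).foldl (fun s c => pvStep s i c) sb

-- A's string_index loop: range(len-1, 0, -1)
def pvPass (sb : List String) : List String :=
  ((List.range' 1 (sb.length - 1)).reverse).foldl pvPassPair sb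

def settle_sand (sandbox_list : List String) (grid : Int) : String :=
  let sb := (List.range (grid - 1).toNat).foldl (fun s _ => pvPass s) sandbox_list
  (List.range grid.toNat).foldl (fun acc a => acc ++ sb.getD a "" ++ "\n") ""

-- ===== PORT B =====
-- Source B's _settle_column: one counting pass, flushing at each wall
def settleColumn (col : List Char) : List Char :=
  let st := col.foldl (fun (st : List Char × Nat × Nat) ch =>
      if ch == ' ' || ch == '.' then
        (st.1, st.2.1 + 1, st.2.2 + (if ch == '.' then 1 else 0))
      else
        (st.1 ++ List.replicate (st.2.1 - st.2.2) ' ' ++ List.replicate st.2.2 '.' ++ [ch], 0, 0))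
    ([], 0, 0)
  st.1 ++ List.replicate (st.2.1 - st.2.2) ' ' ++ List.replicate st.2.2 '.'

def settle_sand_alt (sandbox_list : List String) (grid : Int) : String :=
  let rows := (List.range grid.toNat).map (fun r => sandbox_list.getD r "")
  let width := if rows.isEmpty then 0 else (rows.headD "").toList.length
  let cols := (List.range width).map (fun c => settleColumn (rows.map (fun row => row.toList.getD c '?')))
  ((List.range rows.length).map (fun r => String.ofList (cols.map (fun col => col.getD r '?')) ++ "\n")).foldl (· ++ ·) ""

-- ===== PRECONDITION & SPEC =====
-- Pre_ restricts to the task's natural domain: grid is the number of rows and the grid is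
-- rectangular (or grid ≤ 0, where A outputs '').  A also happens to return values on some
-- mismatched-grid or ragged inputs, but those values are accidental (see claim cites).
def Pre_settle_sand (sandbox_list : List String) (grid : Int) : Prop :=
  grid ≤ 0 ∨ (grid = sandbox_list.length ∧
    ∀ s ∈ sandbox_list, s.toList.length = (sandbox_list.headD "").toList.length)
instance (sandbox_list : List String) (grid : Int) : Decidable (Pre_settle_sand sandbox_list grid) := by
  unfold Pre_settle_sand; infer_instance

def pvWitness_settle_sand : List String × Int := ([".#. ", " . .", ".   "], 3)

def Spec_settle_sand (sandbox_list : List String) (grid : Int) (out : String) : Prop := out = settle_sand_alt sandbox_list grid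
instance (sandbox_list : List String) (grid : Int) (out : String) : Decidable (Spec_settle_sand sandbox_list grid out) := by unfold Spec_settle_sand; infer_instance

-- ===== CLAIM (what is proved, stated in full; the proofs are below) =====
def Claim_equal_settle_sand : Prop := ∀ (sandbox_list : List String) (grid : Int), Dom_settle_sand sandbox_list grid → Pre_settle_sand sandbox_list grid → Spec_settle_sand sandbox_list grid (settle_sand sandbox_list grid)

-- ===== LEMMAS AND PROOFS =====

-- column extraction: character at column c of every row
def colOf (c : Nat) (sb : List String) : List Char := sb.map (fun s => s.toList.getD c '?')

-- per-character swap results for a (top, bottom) pair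
def fTop (t b : Char) : Char := if b == ' ' && t == '.' then ' ' else t
def fBot (t b : Char) : Char := if b == ' ' && t == '.' then '.' else b

-- one bubble pass on a single column, processed bottom-up (A's string_index loop, per column)
def colPass : List Char → List Char
  | [] => []
  | a :: rest =>
    match colPass rest with
    | [] => [a]
    | b :: t => if b == ' ' && a == '.' then ' ' :: '.' :: t else a :: b :: t

-- fully settled wall-free segment
def pack (s : List Char) : List Char :=
  List.replicate (s.length - s.count '.') ' ' ++ List.replicate (s.count '.') '.'

def wallfree (s : List Char) : Prop := ∀ ch ∈ s, ch = ' ' ∨ ch = '.'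

lemma colPass_cons (a : Char) (rest : List Char) (b : Char) (t : List Char)
    (h : colPass rest = b :: t) :
    colPass (a :: rest) = if b == ' ' && a == '.' then ' ' :: '.' :: t else a :: b :: t := by
  simp only [colPass, h]

-- ---- A-side: index loops → structural pass, and its action on columns ----
lemma pvStep_shift (x : String) (xs : List String) (i c : Nat) (hi : 1 ≤ i) :
    pvStep (x :: xs) (i+1) c = x :: pvStep xs i c := by
  obtain ⟨j, rfl⟩ : ∃ j, i = j + 1 := ⟨i - 1, by omega⟩
  simp only [pvStep, List.getD_cons_succ, List.set_cons_succ, Nat.add_sub_cancel]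
  split <;> rfl


lemma pvPassPair_shift (x : String) (xs : List String) (i : Nat) (hi : 1 ≤ i) :
    pvPassPair (x :: xs) (i+1) = x :: pvPassPair xs i := by
  obtain ⟨j, rfl⟩ : ∃ j, i = j + 1 := ⟨i - 1, by omega⟩
  simp only [pvPassPair, List.getD_cons_succ]
  generalize List.range (xs.getD (j+1) "").toList.length = l
  induction l generalizing xs with
  | nil => simp
  | cons c l ihl =>
    simp only [List.foldl_cons]
    rw [pvStep_shift x xs (j+1) c (by omega)]
    exact ihl _


lemma pvPassPair_one (x y : String) (t : List String)
    (h : x.toList.length = y.toList.length) :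
    pvPassPair (x :: y :: t) 1 =
      String.ofList (List.zipWith fTop x.toList y.toList) ::
      String.ofList (List.zipWith fBot x.toList y.toList) :: t := by
  have aux : ∀ c, c ≤ y.toList.length →
      (List.range c).foldl (fun s k => pvStep s 1 k) (x :: y :: t) =
        String.ofList (List.zipWith fTop (x.toList.take c) (y.toList.take c) ++ x.toList.drop c) ::
        String.ofList (List.zipWith fBot (x.toList.take c) (y.toList.take c) ++ y.toList.drop c) :: t := by
    intro c hc
    induction c with
    | zero => simp
    | succ c ihc =>
      have hcb : c < y.toList.length := by omega
      have hca : c < x.toList.length := by omega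
      rw [List.range_succ, List.foldl_append, ihc (by omega)]
      simp only [List.foldl_cons, List.foldl_nil]
      have hzlen : (List.zipWith fTop (x.toList.take c) (y.toList.take c)).length = c := by
        simp only [List.length_zipWith, List.length_take]; omega
      have hzlenB : (List.zipWith fBot (x.toList.take c) (y.toList.take c)).length = c := by
        simp only [List.length_zipWith, List.length_take]; omega
      have hdropB : y.toList.drop c = y.toList[c] :: y.toList.drop (c+1) :=
        List.drop_eq_getElem_cons hcb
      have hdropA : x.toList.drop c = x.toList[c] :: x.toList.drop (c+1) :=
        List.drop_eq_getElem_cons hca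
      have hgetB : (List.zipWith fBot (x.toList.take c) (y.toList.take c) ++ y.toList.drop c).getD c '?'
          = y.toList[c] := by
        rw [List.getD_eq_getElem?_getD, List.getElem?_append_right (by omega), hzlenB,
          Nat.sub_self, hdropB]
        rfl
      have hgetA : (List.zipWith fTop (x.toList.take c) (y.toList.take c) ++ x.toList.drop c).getD c '?'
          = x.toList[c] := by
        rw [List.getD_eq_getElem?_getD, List.getElem?_append_right (by omega), hzlen,
          Nat.sub_self, hdropA]
        rfl
      have htake : ∀ f : Char → Char → Char,
          List.zipWith f (x.toList.take (c+1)) (y.toList.take (c+1)) =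
          List.zipWith f (x.toList.take c) (y.toList.take c) ++ [f x.toList[c] y.toList[c]] := by
        intro f
        rw [List.take_add_one, List.take_add_one, List.getElem?_eq_getElem hca,
          List.getElem?_eq_getElem hcb]
        simp only [Option.toList_some]
        rw [List.zipWith_append (h := by simp only [List.length_take]; omega)]
        simp
      simp only [pvStep, List.getD_cons_succ, List.getD_cons_zero, Nat.sub_self]
      rw [String.toList_ofList, String.toList_ofList, hgetB, hgetA]
      by_cases hcond : (y.toList[c] == ' ' && x.toList[c] == '.') = true
      · rw [if_pos hcond]
        have hsetB : (List.zipWith fBot (x.toList.take c) (y.toList.take c) ++ y.toList.drop c).set c '.'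
            = List.zipWith fBot (x.toList.take c) (y.toList.take c) ++ '.' :: y.toList.drop (c+1) := by
          rw [hdropB, List.set_append_right _ _ (by omega), hzlenB, Nat.sub_self, List.set_cons_zero]
        have hsetA : (List.zipWith fTop (x.toList.take c) (y.toList.take c) ++ x.toList.drop c).set c ' '
            = List.zipWith fTop (x.toList.take c) (y.toList.take c) ++ ' ' :: x.toList.drop (c+1) := by
          rw [hdropA, List.set_append_right _ _ (by omega), hzlen, Nat.sub_self, List.set_cons_zero]
        rw [hsetB, hsetA, htake fTop, htake fBot]
        have hT2 : fTop x.toList[c] y.toList[c] = ' ' := by simp [fTop, hcond]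
        have hB2 : fBot x.toList[c] y.toList[c] = '.' := by simp [fBot, hcond]
        rw [hT2, hB2]
        simp [List.set_cons_zero, List.set_cons_succ, List.append_assoc]
      · rw [if_neg hcond]
        rw [htake fTop, htake fBot]
        have hT : fTop x.toList[c] y.toList[c] = x.toList[c] := by
          simp only [fTop]
          rw [if_neg hcond]
        have hB : fBot x.toList[c] y.toList[c] = y.toList[c] := by
          simp only [fBot]
          rw [if_neg hcond]
        rw [hT, hB, hdropA, hdropB]
        simp [List.append_assoc]
  have this1 := aux y.toList.length le_rfl
  have h1 : x.toList.take y.toList.length = x.toList := List.take_of_length_le (by omega)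
  have h2 : y.toList.take y.toList.length = y.toList := List.take_of_length_le le_rfl
  have h3 : x.toList.drop y.toList.length = [] := List.drop_eq_nil_of_le (by omega)
  have h4 : y.toList.drop y.toList.length = [] := List.drop_eq_nil_of_le le_rfl
  rw [h1, h2, h3, h4, List.append_nil, List.append_nil] at this1
  simp only [pvPassPair, List.getD_cons_succ, List.getD_cons_zero]
  exact this1


lemma pvPass_nil : pvPass [] = [] := by
  rfl

lemma pvPass_single (x : String) : pvPass [x] = [x] := by
  rfl


lemma pvPass_cons (x : String) (xs : List String) (hxs : xs ≠ []) :
    pvPass (x :: xs) = pvPassPair (x :: pvPass xs) 1 := by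
  obtain ⟨m, hm⟩ : ∃ m, xs.length = m + 1 :=
    ⟨xs.length - 1, by cases xs with | nil => exact absurd rfl hxs | cons a l => simp⟩
  have hrange : List.range' 1 (m + 1) = 1 :: (List.range' 1 m).map (· + 1) := by
    rw [List.range'_succ_left]; congr 1
  have aux : ∀ (l : List Nat) (s0 : List String), (∀ i ∈ l, 1 ≤ i) →
      l.foldl (fun sb i => pvPassPair sb (i + 1)) (x :: s0) = x :: l.foldl pvPassPair s0 := by
    intro l
    induction l with
    | nil => intro s0 _; rfl
    | cons i l ihl =>
      intro s0 hl
      simp only [List.foldl_cons]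
      rw [pvPassPair_shift x s0 i (hl i (by simp))]
      exact ihl _ (fun j hj => hl j (by simp [hj]))
  simp only [pvPass, List.length_cons, hm, Nat.add_sub_cancel, hrange,
    List.reverse_cons, ← List.map_reverse]
  rw [List.foldl_append, List.foldl_map,
    aux _ xs (by intro i hi; simp only [List.mem_reverse, List.mem_range'_1] at hi; omega)]
  simp


lemma pvPass_shape (w : Nat) (sb : List String) (h : ∀ s ∈ sb, s.toList.length = w) :
    ((pvPass sb).length = sb.length ∧ ∀ s ∈ pvPass sb, s.toList.length = w) ∧
    ∀ c, c < w → colOf c (pvPass sb) = colPass (colOf c sb) := by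
  induction sb with
  | nil => simp [pvPass_nil, colOf, colPass]
  | cons x xs ih =>
    cases xs with
    | nil =>
      refine ⟨⟨by rw [pvPass_single], by
        intro s hs
        rw [pvPass_single] at hs
        exact h s (by simpa using hs)⟩, ?_⟩
      intro c hc
      simp [pvPass_single, colOf, colPass]
    | cons y t =>
      have hxs : (y :: t : List String) ≠ [] := by simp
      have hsub : ∀ s ∈ (y :: t), s.toList.length = w := fun s hs => h s (by simp [hs])
      obtain ⟨⟨hlen, hwid⟩, hcols⟩ := ih hsub
      cases hp : pvPass (y :: t) with
      | nil => rw [hp] at hlen; simp at hlen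
      | cons y' t' =>
        rw [hp] at hlen hwid hcols
        have hx : x.toList.length = w := h x (by simp)
        have hy' : y'.toList.length = w := hwid y' (by simp)
        rw [pvPass_cons x (y :: t) hxs, hp, pvPassPair_one x y' t' (by rw [hx, hy'])]
        refine ⟨⟨?_, ?_⟩, ?_⟩
        · simp only [List.length_cons] at hlen ⊢
          omega
        · intro s hs
          rcases List.mem_cons.mp hs with rfl | hs2
          · simp only [String.toList_ofList, List.length_zipWith]
            rw [hx, hy']; simp
          rcases List.mem_cons.mp hs2 with rfl | hs3
          · simp only [String.toList_ofList, List.length_zipWith]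
            rw [hx, hy']; simp
          · exact hwid s (by simp [hs3])
        · intro c hc
          have hcx : c < x.toList.length := by omega
          have hcy : c < y'.toList.length := by omega
          have hgetT : (String.ofList (List.zipWith fTop x.toList y'.toList)).toList.getD c '?'
              = fTop (x.toList.getD c '?') (y'.toList.getD c '?') := by
            rw [String.toList_ofList,
              List.getD_eq_getElem _ '?' (by simp only [List.length_zipWith]; omega),
              List.getElem_zipWith, List.getD_eq_getElem _ '?' hcx, List.getD_eq_getElem _ '?' hcy]
          have hgetB : (String.ofList (List.zipWith fBot x.toList y'.toList)).toList.getD c '?'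
              = fBot (x.toList.getD c '?') (y'.toList.getD c '?') := by
            rw [String.toList_ofList,
              List.getD_eq_getElem _ '?' (by simp only [List.length_zipWith]; omega),
              List.getElem_zipWith, List.getD_eq_getElem _ '?' hcx, List.getD_eq_getElem _ '?' hcy]
          have hscrut : colPass (List.map (fun s => s.toList.getD c '?') (y :: t))
              = y'.toList.getD c '?' :: List.map (fun s => s.toList.getD c '?') t' := by
            have h5 := (hcols c hc).symm
            simpa [colOf] using h5
          simp only [colOf, List.map_cons] at hscrut ⊢
          rw [colPass_cons _ _ _ _ hscrut, hgetT, hgetB]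
          simp only [fTop, fBot]
          split_ifs <;> rfl


-- ---- column dynamics: n-1 bubble passes = one counting pass ----
lemma colPass_space (y : List Char) : colPass (' ' :: y) = ' ' :: colPass y := by
  simp only [colPass]
  cases colPass y
  · simp
  · simp

lemma colPass_dots (s : List Char) (h : ∀ ch ∈ s, ch = '.') : colPass s = s := by
  induction s with
  | nil => rfl
  | cons a rest ih =>
    have ha : a = '.' := h a (by simp)
    have hrest : colPass rest = rest := ih (fun ch hch => h ch (by simp [hch]))
    simp only [colPass, hrest]
    cases rest with
    | nil => rfl
    | cons b t =>
      have hb : b = '.' := h b (by simp)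
      subst ha hb; simp


lemma colPass_head_space (s : List Char) (hw : wallfree s) (hm : ' ' ∈ s) :
    ∃ s'', colPass s = ' ' :: s'' ∧ s''.length + 1 = s.length ∧
      s''.count '.' = s.count '.' ∧ wallfree s'' := by
  induction s with
  | nil => cases hm
  | cons a rest ih =>
    by_cases hr : ' ' ∈ rest
    · obtain ⟨t'', h1, h2, h3, h4⟩ := ih (fun ch hch => hw ch (by simp [hch])) hr
      rcases hw a (by simp) with ha | ha <;> subst ha
      · refine ⟨' ' :: t'', ?_, ?_, ?_, ?_⟩
        · simp only [colPass, h1]; simp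
        · simp only [List.length_cons]; omega
        · simp only [List.count_cons]; simp [h3]
        · intro ch hch
          rcases List.mem_cons.mp hch with rfl | hch
          · exact Or.inl rfl
          · exact h4 ch hch
      · refine ⟨'.' :: t'', ?_, ?_, ?_, ?_⟩
        · simp only [colPass, h1]; simp
        · simp only [List.length_cons]; omega
        · simp only [List.count_cons]; simp [h3]
        · intro ch hch
          rcases List.mem_cons.mp hch with rfl | hch
          · exact Or.inr rfl
          · exact h4 ch hch
    · have ha : a = ' ' := by
        rcases List.mem_cons.mp hm with h | h
        · exact h.symm
        · exact absurd h hr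
      subst ha
      have hrest : ∀ ch ∈ rest, ch = '.' :=
        fun ch hch => (hw ch (by simp [hch])).resolve_left (by rintro rfl; exact hr hch)
      rw [colPass_space, colPass_dots rest hrest]
      exact ⟨rest, rfl, by simp, by simp, fun ch hch => hw ch (by simp [hch])⟩


lemma colPass_iterate_space (k : Nat) (y : List Char) :
    colPass^[k] (' ' :: y) = ' ' :: colPass^[k] y := by
  induction k generalizing y with
  | zero => rfl
  | succ k ih =>
    rw [Function.iterate_succ_apply, Function.iterate_succ_apply, colPass_space, ih]


lemma colPass_pack_fixed (a b : Nat) :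
    colPass (List.replicate a ' ' ++ List.replicate b '.') =
      List.replicate a ' ' ++ List.replicate b '.' := by
  induction a with
  | zero =>
    simp only [List.replicate, List.nil_append]
    exact colPass_dots _ (fun ch hch => (List.eq_of_mem_replicate hch))
  | succ a ih => simp only [List.replicate_succ, List.cons_append, colPass_space, ih]


lemma colPass_core (k : Nat) : ∀ s : List Char, wallfree s → s.length ≤ k + 1 →
    colPass^[k] s = pack s := by
  induction k with
  | zero =>
    intro s hw hl
    cases s with
    | nil => simp [pack]
    | cons a t =>
      have ht : t = [] := by
        simp only [List.length_cons] at hl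
        exact List.length_eq_zero_iff.mp (by omega)
      subst ht
      rcases hw a (by simp) with ha | ha <;> subst ha <;> decide
  | succ k ih =>
    intro s hw hl
    by_cases h : s.length ≤ k + 1
    · rw [Function.iterate_succ_apply', ih s hw h]
      simp only [pack]
      exact colPass_pack_fixed _ _
    · by_cases hsp : ' ' ∈ s
      · obtain ⟨s'', h1, h2, h3, h4⟩ := colPass_head_space s hw hsp
        rw [Function.iterate_succ_apply, h1, colPass_iterate_space, ih s'' h4 (by omega)]
        have hc : s''.count '.' ≤ s''.length := List.count_le_length
        have hlen : s.length - s.count '.' = (s''.length - s''.count '.') + 1 := by omega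
        simp [pack, h3, hlen, List.replicate_succ]
      · have hdots : ∀ ch ∈ s, ch = '.' :=
          fun ch hch => (hw ch hch).resolve_left (by rintro rfl; exact hsp hch)
        rw [Function.iterate_fixed (colPass_dots s hdots)]
        have hcount : s.count '.' = s.length := List.count_eq_length.mpr (fun b hb => ((hdots b hb).symm ▸ rfl))
        have hrep : s = List.replicate s.length '.' :=
          List.eq_replicate_iff.mpr ⟨rfl, fun b hb => hdots b hb⟩
        rw [pack, hcount]
        simp
        exact hrep


lemma colPass_wall (w : Char) (hw : ¬(w = ' ' ∨ w = '.')) (xs ys : List Char) :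
    colPass (xs ++ w :: ys) = colPass xs ++ w :: colPass ys := by
  induction xs with
  | nil =>
    have hwd : (w == '.') = false := by
      simpa using fun h => hw (Or.inr h)
    have hws : (w == ' ') = false := by
      simpa using fun h => hw (Or.inl h)
    simp only [List.nil_append, colPass]
    cases h : colPass ys <;> simp [hwd]
  | cons x xs ih =>
    have hws : (w == ' ') = false := by
      simpa using fun h => hw (Or.inl h)
    simp only [List.cons_append, colPass, ih]
    cases h : colPass xs with
    | nil => simp [hws]
    | cons b t => simp only [List.cons_append]; split <;> simp


lemma colPass_iterate_wall (k : Nat) (w : Char) (hw : ¬(w = ' ' ∨ w = '.')) (xs ys : List Char) :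
    colPass^[k] (xs ++ w :: ys) = colPass^[k] xs ++ w :: colPass^[k] ys := by
  induction k generalizing xs ys with
  | zero => rfl
  | succ k ih =>
    rw [Function.iterate_succ_apply, Function.iterate_succ_apply, Function.iterate_succ_apply,
      colPass_wall w hw, ih]


-- ---- settleColumn characterisation ----
lemma settleFold_out (s : List Char) (out : List Char) (seg sand : Nat) :
    s.foldl (fun (st : List Char × Nat × Nat) ch =>
      if ch == ' ' || ch == '.' then
        (st.1, st.2.1 + 1, st.2.2 + (if ch == '.' then 1 else 0))
      else
        (st.1 ++ List.replicate (st.2.1 - st.2.2) ' ' ++ List.replicate st.2.2 '.' ++ [ch], 0, 0))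
      (out, seg, sand)
    = ((out ++ (s.foldl (fun (st : List Char × Nat × Nat) ch =>
      if ch == ' ' || ch == '.' then
        (st.1, st.2.1 + 1, st.2.2 + (if ch == '.' then 1 else 0))
      else
        (st.1 ++ List.replicate (st.2.1 - st.2.2) ' ' ++ List.replicate st.2.2 '.' ++ [ch], 0, 0))
      ([], seg, sand)).1,
      (s.foldl (fun (st : List Char × Nat × Nat) ch =>
      if ch == ' ' || ch == '.' then
        (st.1, st.2.1 + 1, st.2.2 + (if ch == '.' then 1 else 0))
      else
        (st.1 ++ List.replicate (st.2.1 - st.2.2) ' ' ++ List.replicate st.2.2 '.' ++ [ch], 0, 0))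
      ([], seg, sand)).2)) := by
  induction s generalizing out seg sand with
  | nil => simp
  | cons a s ih =>
    by_cases h : (a == ' ' || a == '.') = true
    · simp only [List.foldl_cons, if_pos h]
      exact ih _ _ _
    · simp only [List.foldl_cons, if_neg h, List.nil_append]
      rw [ih, ih (List.replicate (seg - sand) ' ' ++ List.replicate sand '.' ++ [a]) 0 0]
      simp [List.append_assoc]


lemma settleFold_wallfree (s : List Char) (hw : wallfree s) (out : List Char) (seg sand : Nat) :
    s.foldl (fun (st : List Char × Nat × Nat) ch =>
      if ch == ' ' || ch == '.' then
        (st.1, st.2.1 + 1, st.2.2 + (if ch == '.' then 1 else 0))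
      else
        (st.1 ++ List.replicate (st.2.1 - st.2.2) ' ' ++ List.replicate st.2.2 '.' ++ [ch], 0, 0))
      (out, seg, sand)
    = (out, seg + s.length, sand + s.count '.') := by
  induction s generalizing out seg sand with
  | nil => simp
  | cons a s ih =>
    rcases hw a (by simp) with h | h <;> subst h
    · simp only [List.foldl_cons]
      rw [if_pos (by simp), ih (fun ch hch => hw ch (by simp [hch]))]
      simp
      omega
    · simp only [List.foldl_cons]
      rw [if_pos (by simp), ih (fun ch hch => hw ch (by simp [hch]))]
      simp
      omega


lemma settleColumn_wallfree (s : List Char) (hw : wallfree s) : settleColumn s = pack s := by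
  simp only [settleColumn]
  rw [settleFold_wallfree s hw [] 0 0]
  simp [pack]


lemma settleColumn_split (xs : List Char) (hxs : wallfree xs) (w : Char) (hw : ¬(w = ' ' ∨ w = '.'))
    (ys : List Char) : settleColumn (xs ++ w :: ys) = pack xs ++ w :: settleColumn ys := by
  have hwb : ¬((w == ' ' || w == '.') = true) := by simpa using hw
  simp only [settleColumn, List.foldl_append, List.foldl_cons]
  rw [settleFold_wallfree xs hxs [] 0 0, if_neg hwb, settleFold_out]
  simp [pack, List.append_assoc]


-- the heart: for a column of length ≤ k+1, k bubble passes fully settle it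
lemma colPass_settles (n : Nat) : ∀ (s : List Char) (k : Nat), s.length ≤ n →
    s.length ≤ k + 1 → colPass^[k] s = settleColumn s := by
  induction n with
  | zero =>
    intro s k hn _
    have : s = [] := List.length_eq_zero_iff.mp (by omega)
    subst this
    rw [Function.iterate_fixed rfl]
    rfl
  | succ n ih =>
    intro s k hn hk
    cases hd : s.dropWhile (fun ch => ch == ' ' || ch == '.') with
    | nil =>
      have hw : wallfree s := by
        intro ch hch
        have := List.dropWhile_eq_nil_iff.mp hd ch hch
        simpa using this
      rw [colPass_core k s hw hk, settleColumn_wallfree s hw]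
    | cons w ys =>
      have hsplit : s = s.takeWhile (fun ch => ch == ' ' || ch == '.') ++ w :: ys := by
        conv_lhs => rw [← List.takeWhile_append_dropWhile
          (p := fun ch => ch == ' ' || ch == '.') (l := s)]
        rw [hd]
      have hxs : wallfree (s.takeWhile (fun ch => ch == ' ' || ch == '.')) := by
        intro ch hch
        have := List.mem_takeWhile_imp hch
        simpa using this
      have hwwall : ¬(w = ' ' ∨ w = '.') := by
        have hne : s.dropWhile (fun ch => ch == ' ' || ch == '.') ≠ [] := by simp [hd]
        have h2 := List.head_dropWhile_not (fun ch => ch == ' ' || ch == '.') hne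
        have h3 : (s.dropWhile (fun ch => ch == ' ' || ch == '.')).head hne = w := by
          simp [hd]
        rw [h3] at h2
        simpa using h2
      have hlen : s.length = (s.takeWhile (fun ch => ch == ' ' || ch == '.')).length + ys.length + 1 := by
        conv_lhs => rw [hsplit]
        simp
        omega
      rw [hsplit, colPass_iterate_wall k w hwwall,
        colPass_core k _ hxs (by omega),
        ih ys k (by omega) (by omega),
        settleColumn_split _ hxs w hwwall]


-- ---- assembly ----
lemma iterPasses_cols (m : Nat) (w : Nat) (sb : List String) (h : ∀ s ∈ sb, s.toList.length = w) :
    (((List.range m).foldl (fun s _ => pvPass s) sb).length = sb.length ∧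
      ∀ s ∈ (List.range m).foldl (fun s _ => pvPass s) sb, s.toList.length = w) ∧
    ∀ c, c < w → colOf c ((List.range m).foldl (fun s _ => pvPass s) sb)
      = colPass^[m] (colOf c sb) := by
  induction m with
  | zero =>
    refine ⟨⟨rfl, h⟩, ?_⟩
    intro c hc
    rfl
  | succ m ihm =>
    obtain ⟨⟨hlen, hwid⟩, hcols⟩ := ihm
    rw [List.range_succ, List.foldl_append]
    simp only [List.foldl_cons, List.foldl_nil]
    obtain ⟨⟨hlen2, hwid2⟩, hcols2⟩ := pvPass_shape w _ hwid
    refine ⟨⟨by rw [hlen2, hlen], hwid2⟩, ?_⟩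
    intro c hc
    rw [hcols2 c hc, hcols c hc, Function.iterate_succ_apply']


lemma map_getD_range (l : List String) : (List.range l.length).map (fun r => l.getD r "") = l := by
  apply List.ext_getElem
  · simp
  · intro i h1 h2
    simp [List.getD_eq_getElem?_getD, List.getElem?_eq_getElem h2]


lemma map_getD_range_chars (l : List Char) (d : Char) :
    (List.range l.length).map (fun c => l.getD c d) = l := by
  apply List.ext_getElem
  · simp
  · intro i h1 h2
    simp [List.getD_eq_getElem?_getD, List.getElem?_eq_getElem h2]


-- ===== VERDICT (by name: the statement is the Claim_ definition above) =====
theorem settle_sand_spec : Claim_equal_settle_sand := by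
  intro sandbox_list grid _ hpre
  unfold Spec_settle_sand
  rcases hpre with hneg | ⟨hgrid, hrect⟩
  · have h1 : grid.toNat = 0 := Int.toNat_of_nonpos hneg
    have h2 : (grid - 1).toNat = 0 := Int.toNat_of_nonpos (by omega)
    simp [settle_sand, settle_sand_alt, h1, h2]
  · by_cases hemp : sandbox_list = []
    · subst hemp
      have h0 : grid = 0 := by simpa using hgrid
      subst h0
      rfl
    · have hn1 : 1 ≤ sandbox_list.length := List.length_pos_iff.mpr hemp
      have h1 : grid.toNat = sandbox_list.length := by omega
      have h2 : (grid - 1).toNat = sandbox_list.length - 1 := by omega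
      have hrows : (List.range sandbox_list.length).map (fun r => sandbox_list.getD r "") = sandbox_list :=
        map_getD_range sandbox_list
      have hwidth : sandbox_list.isEmpty = false := by simp [hemp]
      obtain ⟨⟨hlenF, hwidF⟩, hcolsF⟩ :=
        iterPasses_cols (sandbox_list.length - 1) ((sandbox_list.headD "").toList.length)
          sandbox_list hrect
      simp only [settle_sand, settle_sand_alt, hrows, h1, h2, hwidth, Bool.false_eq_true,
        if_false]
      rw [List.foldl_map]
      apply PySem.List.foldl_congr_mem
      intro acc r hr
      have hrn : r < sandbox_list.length := by
        simpa using List.mem_range.mp hr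
      have hrF : r < ((List.range (sandbox_list.length - 1)).foldl (fun s _ => pvPass s) sandbox_list).length := by
        rw [hlenF]; exact hrn
      -- the settled row r equals the r-th characters of the settled columns
      have hrowlen : (((List.range (sandbox_list.length - 1)).foldl (fun s _ => pvPass s) sandbox_list).getD r "").toList.length
          = (sandbox_list.headD "").toList.length := by
        rw [List.getD_eq_getElem _ _ hrF]
        exact hwidF _ (List.getElem_mem hrF)
      have hcolrow : ∀ c, c < (sandbox_list.headD "").toList.length →
          (settleColumn (colOf c sandbox_list)).getD r '?'
            = (((List.range (sandbox_list.length - 1)).foldl (fun s _ => pvPass s) sandbox_list).getD r "").toList.getD c '?' := by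
        intro c hc
        have hsettle : colPass^[sandbox_list.length - 1] (colOf c sandbox_list) = settleColumn (colOf c sandbox_list) := by
          apply colPass_settles sandbox_list.length _ _ (by simp [colOf]) (by simp [colOf]; omega)
        rw [← hsettle, ← hcolsF c hc]
        simp only [colOf]
        rw [List.getD_eq_getElem _ '?' (by simpa using hrF), List.getElem_map,
          List.getD_eq_getElem _ "" hrF]
      have hrow : String.ofList (((List.range ((sandbox_list.headD "").toList.length)).map
            (fun c => settleColumn (sandbox_list.map (fun row => row.toList.getD c '?')))).map
            (fun col => col.getD r '?'))
          = ((List.range (sandbox_list.length - 1)).foldl (fun s _ => pvPass s) sandbox_list).getD r "" := by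
        simp only [List.map_map, Function.comp_def]
        have : ((List.range ((sandbox_list.headD "").toList.length)).map
            (fun c => (settleColumn (sandbox_list.map (fun row => row.toList.getD c '?'))).getD r '?'))
            = ((List.range ((sandbox_list.headD "").toList.length)).map
            (fun c => (((List.range (sandbox_list.length - 1)).foldl (fun s _ => pvPass s) sandbox_list).getD r "").toList.getD c '?')) := by
          apply List.map_congr_left
          intro c hc
          exact hcolrow c (List.mem_range.mp hc)
        rw [this, ← hrowlen, map_getD_range_chars, String.ofList_toList]
      rw [hrow, ← String.append_assoc]
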